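-- pv_equiv track=rewrite | github.com/coachpo/clay | app/core/client.py | _remove_present_optional_fields
-- ===== SOURCE A (Python) =====
-- from typing import Any, AsyncGenerator, Dict, Optional
--
-- def _remove_present_optional_fields(
--     request: Dict[str, Any],
--     fallback_fields: tuple[str, ...],
-- ) -> tuple[Dict[str, Any], tuple[str, ...]]:
--     next_request = dict(request)
--     removed_fields: list[str] = []
--     for field in fallback_fields:
--         if field in next_request:
--             next_request.pop(field, None)
--             removed_fields.append(field)
--     return next_request, tuple(removed_fields)
-- ===== SOURCE B (Python) =====
-- from typing import Any, Dict
--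
--
-- def _remove_present_optional_fields(
--     request: Dict[str, Any],
--     fallback_fields: tuple[str, ...],
-- ) -> tuple[Dict[str, Any], tuple[str, ...]]:
--     # Index each fallback field by its first position, then make ONE pass over the
--     # request partitioning items into kept vs hit, and finally order the hit keys
--     # by their rank in fallback_fields.
--     rank: Dict[str, int] = {}
--     for i, f in enumerate(fallback_fields):
--         if f not in rank:
--             rank[f] = i
--     next_request: Dict[str, Any] = {}
--     hits: list = []
--     for k, v in request.items():
--         if k in rank:
--             hits.append(k)
--         else:
--             next_request[k] = v
--     hits.sort(key=rank.__getitem__)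
--     return next_request, tuple(hits)
-- ===== Notes on version B (the rewrite author's own statement) =====
-- stated objective: alternative
-- what changed: B builds a first-occurrence rank index of fallback_fields, makes a single pass over request.items() partitioning entries into kept vs hit, and sorts the hit keys by rank, instead of A's loop over fallback_fields popping from a dict copy.
import Mathlib
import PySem

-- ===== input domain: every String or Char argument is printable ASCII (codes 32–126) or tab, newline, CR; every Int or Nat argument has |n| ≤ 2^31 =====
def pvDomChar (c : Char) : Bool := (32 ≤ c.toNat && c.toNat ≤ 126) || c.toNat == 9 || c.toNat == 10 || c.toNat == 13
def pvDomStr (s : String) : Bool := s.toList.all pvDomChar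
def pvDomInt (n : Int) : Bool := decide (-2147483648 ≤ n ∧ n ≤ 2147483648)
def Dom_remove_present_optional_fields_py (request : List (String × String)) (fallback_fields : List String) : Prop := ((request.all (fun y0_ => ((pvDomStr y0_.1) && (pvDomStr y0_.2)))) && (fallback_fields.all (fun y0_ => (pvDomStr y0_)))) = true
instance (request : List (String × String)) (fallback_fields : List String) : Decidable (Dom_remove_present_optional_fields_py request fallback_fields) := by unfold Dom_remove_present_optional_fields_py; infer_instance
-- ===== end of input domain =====

-- B replaces A's pop-from-a-copy loop over fallback_fields by a rank index of fallback_fields,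
-- one partitioning pass over the request items, and a sort of the hit keys by rank (objective: alternative).
-- ===== PORT A =====
def remove_present_optional_fields_py (request : List (String × String)) (fallback_fields : List String) : (List (String × String)) × List String :=
  let st := fallback_fields.foldl
    (fun (st : PySem.Dict String String × List String) field =>
      if st.1.contains field then (st.1.erase field, st.2 ++ [field]) else st)
    (PySem.Dict.ofList request, ([] : List String))
  (st.1.items, st.2)

-- ===== PORT B =====
-- B: rank = first-occurrence index of each fallback field; one pass over the request
-- partitioning items into kept/hit; hit keys sorted by rank (rank[k] always exists for a
-- hit key, so getD is exact for Python's rank[k]).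
def remove_present_optional_fields_py_alt (request : List (String × String)) (fallback_fields : List String) : (List (String × String)) × List String :=
  let rank : PySem.Dict String Int :=
    (PySem.List.enumerate fallback_fields).foldl
      (fun r p => if r.contains p.2 then r else r.insert p.2 p.1) PySem.Dict.empty
  let st := (PySem.Dict.ofList request).items.foldl
    (fun (st : PySem.Dict String String × List String) kv =>
      if rank.contains kv.1 then (st.1, st.2 ++ [kv.1]) else (st.1.insert kv.1 kv.2, st.2))
    (PySem.Dict.empty, ([] : List String))
  (st.1.items, PySem.List.sorted st.2 (fun k => rank.getD k 0))

-- ===== PRECONDITION & SPEC =====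
def Spec_remove_present_optional_fields_py (request : List (String × String)) (fallback_fields : List String) (out : (List (String × String)) × List String) : Prop := out = remove_present_optional_fields_py_alt request fallback_fields
instance (request : List (String × String)) (fallback_fields : List String) (out : (List (String × String)) × List String) : Decidable (Spec_remove_present_optional_fields_py request fallback_fields out) := by unfold Spec_remove_present_optional_fields_py; infer_instance

-- ===== CLAIM (what is proved, stated in full; the proofs are below) =====
def Claim_equal_remove_present_optional_fields_py : Prop := ∀ (request : List (String × String)) (fallback_fields : List String), Dom_remove_present_optional_fields_py request fallback_fields → Spec_remove_present_optional_fields_py request fallback_fields (remove_present_optional_fields_py request fallback_fields)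

-- ===== LEMMAS AND PROOFS =====

lemma erase_contains (d : PySem.Dict String String) (f g : String) :
    (d.erase f).contains g = (!(g == f) && d.contains g) := by
  simp only [PySem.Dict.erase, PySem.Dict.contains, List.any_filter]
  by_cases h : g = f
  · subst h; simp
  · have : ∀ kv : String × String, (!(kv.1 == f) && kv.1 == g) = (kv.1 == g) := by
      intro kv
      by_cases hk : kv.1 = g
      · subst hk; simp [h]
      · simp [hk]
    simp [this, h]

lemma dedup_filter_comm (p : String → Bool) (l : List String) :
    PySem.List.dedup (l.filter p) = (PySem.List.dedup l).filter p := by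
  induction l with
  | nil => rfl
  | cons x l ih =>
    simp only [PySem.List.dedup] at *
    by_cases hp : p x = true
    · rw [List.filter_cons, if_pos hp, PySem.Set.ofList_cons, PySem.Set.ofList_cons, ih]
      simp only [PySem.Set.discard, List.filter_cons, hp, List.filter_filter]
      congr 1
      exact List.filter_congr (fun a _ => Bool.and_comm _ _)
    · have hx : p x = false := by simpa using hp
      rw [List.filter_cons, if_neg (by simp [hx]), PySem.Set.ofList_cons, ih]
      simp only [PySem.Set.discard, List.filter_cons, hx, List.filter_filter,
        Bool.false_eq_true, if_false]
      refine (List.filter_congr ?_).symm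
      intro a _
      by_cases ha : a = x
      · subst ha; simp [hx]
      · simp [ha]

lemma dedup_cons (x : String) (l : List String) :
    PySem.List.dedup (x :: l) = x :: (PySem.List.dedup l).filter (fun y => !(y == x)) := by
  simp only [PySem.List.dedup, PySem.Set.ofList_cons, PySem.Set.discard]

lemma loop_eq (fields : List String) : ∀ (d : PySem.Dict String String) (acc : List String),
    fields.foldl
      (fun (st : PySem.Dict String String × List String) field =>
        if st.1.contains field then (st.1.erase field, st.2 ++ [field]) else st)
      (d, acc) =
    (PySem.Dict.mk (d.items.filter
        (fun kv => !((PySem.List.dedup (fields.filter d.contains)).contains kv.1))),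
     acc ++ PySem.List.dedup (fields.filter d.contains)) := by
  induction fields with
  | nil => intro d acc; simp
  | cons f fs ih =>
    intro d acc
    by_cases h : d.contains f = true
    · have hr : PySem.List.dedup (fs.filter (d.erase f).contains)
          = (PySem.List.dedup (fs.filter d.contains)).filter (fun y => !(y == f)) := by
        have hconts : fs.filter (d.erase f).contains
            = (fs.filter d.contains).filter (fun g => !(g == f)) := by
          simp only [List.filter_filter]
          exact List.filter_congr (fun g _ => by rw [erase_contains])
        rw [hconts]; exact dedup_filter_comm _ _
      have hfull : PySem.List.dedup ((f :: fs).filter d.contains)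
          = f :: PySem.List.dedup (fs.filter (d.erase f).contains) := by
        rw [List.filter_cons, if_pos h, dedup_cons]
        try rw [hr]
      rw [List.foldl_cons]
      simp only [h, if_true]
      rw [ih, hfull]
      refine Prod.ext ?_ ?_
      · show PySem.Dict.mk ((d.erase f).items.filter _) = PySem.Dict.mk (d.items.filter _)
        congr 1
        show (d.erase f).items.filter _ = d.items.filter _
        simp only [PySem.Dict.erase, List.filter_filter]
        refine List.filter_congr (fun kv _ => ?_)
        simp [Bool.and_comm]
      · simp
    · have h' : d.contains f = false := by simpa using h
      rw [List.foldl_cons]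
      simp only [h', Bool.false_eq_true, if_false]
      rw [ih, List.filter_cons, if_neg (by simp [h'])]

-- the rank loop of B: contains / lookup-preservation / lower bound on new values /
-- strict rank increase along dedup
lemma rank_fold_spec (fs : List String) : ∀ (n : Int) (r0 : PySem.Dict String Int),
    (∀ x, ((PySem.List.enumerate fs n).foldl
        (fun r p => if r.contains p.2 then r else r.insert p.2 p.1) r0).contains x
      = (r0.contains x || fs.contains x))
    ∧ (∀ x, r0.contains x = true →
        ((PySem.List.enumerate fs n).foldl
            (fun r p => if r.contains p.2 then r else r.insert p.2 p.1) r0).get? x = r0.get? x)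
    ∧ (∀ x, r0.contains x = false → x ∈ fs →
        ∃ v, ((PySem.List.enumerate fs n).foldl
            (fun r p => if r.contains p.2 then r else r.insert p.2 p.1) r0).get? x = some v ∧ n ≤ v)
    ∧ ((PySem.List.dedup fs).filter (fun f => !r0.contains f)).Pairwise
        (fun a b => ((PySem.List.enumerate fs n).foldl
            (fun r p => if r.contains p.2 then r else r.insert p.2 p.1) r0).getD a 0
          < ((PySem.List.enumerate fs n).foldl
            (fun r p => if r.contains p.2 then r else r.insert p.2 p.1) r0).getD b 0) := by
  induction fs with
  | nil =>
    intro n r0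
    refine ⟨?_, ?_, ?_, ?_⟩
    · intro x; simp [PySem.List.enumerate]
    · intro x _; simp [PySem.List.enumerate]
    · intro x _ h; simp at h
    · simp [PySem.List.enumerate, PySem.List.dedup, PySem.Set.ofList]
  | cons y t ih =>
    intro n r0
    have hen : PySem.List.enumerate (y :: t) n = (n, y) :: PySem.List.enumerate t (n+1) := by
      simp [PySem.List.enumerate]
    by_cases hc : r0.contains y = true
    · obtain ⟨ih1, ih2, ih3, ih4⟩ := ih (n+1) r0
      rw [hen]
      simp only [List.foldl_cons, hc, if_true]
      refine ⟨?_, ih2, ?_, ?_⟩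
      · intro x
        rw [ih1, List.contains_cons]
        by_cases hx : x = y
        · subst hx; simp [hc]
        · have hxy : (x == y) = false := beq_eq_false_iff_ne.2 hx
          rw [hxy]; simp
      · intro x hx hm
        rcases List.mem_cons.1 hm with h | h
        · exact absurd hc (by rw [← h, hx]; simp)
        · obtain ⟨v, hv, hle⟩ := ih3 x hx h
          exact ⟨v, hv, by omega⟩
      · rw [dedup_cons]
        rw [List.filter_cons]
        simp only [hc, Bool.not_true, Bool.false_eq_true, if_false]
        exact List.Pairwise.sublist (List.Sublist.filter _ (List.filter_sublist)) ih4
    · have hc' : r0.contains y = false := by simpa using hc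
      obtain ⟨ih1, ih2, ih3, ih4⟩ := ih (n+1) (r0.insert y n)
      rw [hen]
      simp only [List.foldl_cons, hc', Bool.false_eq_true, if_false]
      refine ⟨?_, ?_, ?_, ?_⟩
      · intro x
        rw [ih1, PySem.Dict.contains_insert, List.contains_cons]
        by_cases hx : x = y
        · subst hx; simp [hc']
        · have hxy : (x == y) = false := beq_eq_false_iff_ne.2 hx
          rw [hxy]; simp
      · intro x hx
        have hne : x ≠ y := fun h => by rw [h] at hx; exact absurd hx (by simp [hc'])
        have : (r0.insert y n).contains x = true := by
          rw [PySem.Dict.contains_insert]; simp [hx]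
        rw [ih2 x this, PySem.Dict.get?_insert_of_ne _ _ hne]
      · intro x hx hm
        by_cases hxy : x = y
        · subst hxy
          have : (r0.insert x n).contains x = true := by
            rw [PySem.Dict.contains_insert]; simp
          rw [ih2 x this, PySem.Dict.get?_insert_self]
          exact ⟨n, rfl, le_refl n⟩
        · have hmt : x ∈ t := by rcases List.mem_cons.1 hm with h | h; exact absurd h hxy; exact h
          have : (r0.insert y n).contains x = false := by
            rw [PySem.Dict.contains_insert]; simp [hxy, hx]
          obtain ⟨v, hv, hle⟩ := ih3 x this hmt
          exact ⟨v, hv, by omega⟩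
      · rw [dedup_cons, List.filter_cons]
        simp only [hc', Bool.not_false, if_true]
        have hgy : ((PySem.List.enumerate t (n+1)).foldl
            (fun r p => if r.contains p.2 then r else r.insert p.2 p.1) (r0.insert y n)).getD y 0 = n := by
          have hcy : (r0.insert y n).contains y = true := by
            rw [PySem.Dict.contains_insert]; simp
          refine PySem.Dict.getD_of_get?_eq_some _ _ ?_
          rw [ih2 y hcy, PySem.Dict.get?_insert_self]
        have hsub : List.filter (fun f => !r0.contains f)
            (List.filter (fun z => !(z == y)) (PySem.List.dedup t))
            = (PySem.List.dedup t).filter (fun f => !(r0.insert y n).contains f) := by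
          rw [List.filter_filter]
          refine List.filter_congr (fun a _ => ?_)
          rw [PySem.Dict.contains_insert]
          cases a == y <;> cases r0.contains a <;> simp
        refine List.Pairwise.cons ?_ ?_
        · intro b hb
          rw [hsub] at hb
          obtain ⟨hbd, hbr⟩ := List.mem_filter.1 hb
          have hbr' : (r0.insert y n).contains b = false := by simpa using hbr
          have hbt : b ∈ t := by
            simp only [PySem.List.dedup] at hbd
            exact (PySem.Set.mem_ofList t b).1 hbd
          obtain ⟨v, hv, hle⟩ := ih3 b hbr' hbt
          rw [hgy, PySem.Dict.getD_of_get?_eq_some _ _ hv]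
          omega
        · rw [hsub]; exact ih4

-- the B partition loop over the request items, split into its two accumulators
lemma loop_eq_B (rank : PySem.Dict String Int) : ∀ (items : List (String × String)) (da : PySem.Dict String String) (ha : List String),
    items.foldl
      (fun (st : PySem.Dict String String × List String) kv =>
        if rank.contains kv.1 then (st.1, st.2 ++ [kv.1]) else (st.1.insert kv.1 kv.2, st.2))
      (da, ha)
    = ((items.filter (fun kv => !(rank.contains kv.1))).foldl
          (fun dd kv => dd.insert kv.1 kv.2) da,
       ha ++ (items.filter (fun kv => rank.contains kv.1)).map Prod.fst) := by
  intro items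
  induction items with
  | nil => intro da ha; simp
  | cons kv t ih =>
    intro da ha
    by_cases h : rank.contains kv.1 = true
    · simp [h, ih]
    · have h' : rank.contains kv.1 = false := by simpa using h
      simp [h', ih]

-- ===== VERDICT (by name: the statement is the Claim_ definition above) =====
theorem remove_present_optional_fields_py_spec : Claim_equal_remove_present_optional_fields_py := by
  intro request fs _
  unfold Spec_remove_present_optional_fields_py
  unfold remove_present_optional_fields_py remove_present_optional_fields_py_alt
  dsimp only
  rw [loop_eq, loop_eq_B]
  obtain ⟨hr1, _, _, hr4⟩ := rank_fold_spec fs 0 PySem.Dict.empty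
  set d := PySem.Dict.ofList request with hdd
  set rank := (PySem.List.enumerate fs 0).foldl
      (fun r p => if r.contains p.2 then r else r.insert p.2 p.1) PySem.Dict.empty with hrank
  set removed := PySem.List.dedup (fs.filter d.contains) with hrem
  have hrankc : ∀ x, rank.contains x = fs.contains x := by
    intro x; rw [hr1 x]; simp
  have hremc : ∀ x, d.contains x = true → (removed.contains x = rank.contains x) := by
    intro x hdx
    rw [hrankc x, hrem]
    by_cases hm : x ∈ fs
    · simp [hm, hdx]
    · simp [hm]
  have hcontains_mem : ∀ kv : String × String, kv ∈ d.items → d.contains kv.1 = true := by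
    intro kv hkv
    simp only [PySem.Dict.contains, List.any_eq_true]
    exact ⟨kv, hkv, by simp⟩
  have hkeysnd : (d.items.map Prod.fst).Nodup := PySem.Dict.nodup_keys_ofList request
  refine Prod.ext ?_ ?_
  · -- kept dict items
    show d.items.filter (fun kv => !(removed.contains kv.1))
        = ((d.items.filter (fun kv => !(rank.contains kv.1))).foldl
            (fun dd kv => dd.insert kv.1 kv.2) PySem.Dict.empty).items
    rw [PySem.Dict.items_foldl_insert_fresh _ Prod.fst Prod.snd _
      (fun a _ => PySem.Dict.contains_empty a.1)
      ((List.Sublist.map Prod.fst List.filter_sublist).nodup hkeysnd)]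
    simp only [PySem.Dict.empty, List.nil_append]
    rw [List.map_id'' (fun a : String × String => rfl)]
    exact List.filter_congr (fun kv hkv => by rw [hremc kv.1 (hcontains_mem kv hkv)])
  · -- removed list
    show ([] : List String) ++ removed
        = PySem.List.sorted ((d.items.filter (fun kv => rank.contains kv.1)).map Prod.fst)
            (fun k => rank.getD k 0)
    rw [List.nil_append]
    refine (PySem.List.sorted_eq_of_perm_of_pairwise_lt _ _ _ ?_ ?_).symm
    · -- removed.Perm hits
      have ndr : removed.Nodup := by
        rw [hrem]; simp only [PySem.List.dedup]; exact PySem.Set.nodup_ofList _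
      have ndh : ((d.items.filter (fun kv => rank.contains kv.1)).map Prod.fst).Nodup :=
        (List.Sublist.map Prod.fst List.filter_sublist).nodup hkeysnd
      refine (List.perm_ext_iff_of_nodup ndr ndh).2 (fun a => ?_)
      constructor
      · intro ha
        rw [hrem] at ha
        simp only [PySem.List.dedup] at ha
        obtain ⟨haf, had⟩ := List.mem_filter.1 ((PySem.Set.mem_ofList _ a).1 ha)
        simp only [PySem.Dict.contains, List.any_eq_true] at had
        obtain ⟨kv, hkv, hbeq⟩ := had
        have hk : kv.1 = a := by simpa using hbeq
        refine List.mem_map.2 ⟨kv, List.mem_filter.2 ⟨hkv, ?_⟩, hk⟩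
        rw [hk, hrankc a]
        simp [haf]
      · intro ha
        obtain ⟨kv, hkv, hk⟩ := List.mem_map.1 ha
        obtain ⟨hkvm, hkvr⟩ := List.mem_filter.1 hkv
        have haf : a ∈ fs := by
          have := hkvr
          rw [hk, hrankc a] at this
          simpa using this
        have had : d.contains a = true := by
          rw [← hk]; exact hcontains_mem kv hkvm
        rw [hrem]
        simp only [PySem.List.dedup]
        exact (PySem.Set.mem_ofList _ a).2 (List.mem_filter.2 ⟨haf, had⟩)
    · -- strictly increasing ranks along removed
      rw [hrem, dedup_filter_comm]
      have hr4' : (PySem.List.dedup fs).Pairwise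
          (fun a b => rank.getD a 0 < rank.getD b 0) := by
        have := hr4
        simpa using this
      exact List.Pairwise.sublist List.filter_sublist hr4'
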